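-- pv_equiv track=rewrite | github.com/JeongDongYoon1002/Programming-Algorithm | B0J-Algorithm/BOJ_1668.py | solve
-- ===== SOURCE A (Python) =====
-- def solve(array):
--     now = array[0]
--     result = 1
--     for i in range(1, len(array)):
--         if now < array[i]:
--             result += 1
--             now = array[i]
--     return result
-- ===== SOURCE B (Python) =====
-- def solve(array):
--     prefix = []
--     m = array[0]
--     for x in array:
--         m = m if m > x else x
--         prefix.append(m)
--     return len(set(prefix))
-- ===== Notes on version B (the rewrite author's own statement) =====
-- stated objective: alternative
-- what changed: Instead of counting increments of an inline running maximum, B materialises the running-maximum (prefix-max) sequence and returns the number of distinct values it takes via len(set(...)); Pre_ excludes the empty list, on which both programs raise IndexError.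
import Mathlib
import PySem

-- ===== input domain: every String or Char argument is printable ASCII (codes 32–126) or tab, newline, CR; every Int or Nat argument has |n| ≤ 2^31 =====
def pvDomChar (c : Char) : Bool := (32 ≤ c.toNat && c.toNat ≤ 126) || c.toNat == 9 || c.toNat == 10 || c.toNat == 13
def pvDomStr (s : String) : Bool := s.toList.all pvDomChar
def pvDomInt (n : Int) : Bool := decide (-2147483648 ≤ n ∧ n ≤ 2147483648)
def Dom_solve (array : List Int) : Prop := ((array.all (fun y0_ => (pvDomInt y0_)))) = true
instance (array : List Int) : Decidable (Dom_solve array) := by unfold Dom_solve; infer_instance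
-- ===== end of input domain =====

-- B keeps the running-maximum sequence explicitly and counts its distinct values with a set,
-- instead of counting the increments of an inline running maximum.

-- ===== PORT A =====
-- the for-loop of A over array[1:], state (now, result)
def solveLoopA (now result : Int) : List Int → Int
  | [] => result
  | x :: xs => if now < x then solveLoopA x (result + 1) xs else solveLoopA now result xs

def solve (array : List Int) : Int :=
  match array with
  | [] => 0          -- A raises IndexError here; excluded by Pre_solve
  | a :: rest => solveLoopA a 1 rest

-- ===== PORT B =====
-- the for-loop of B: builds the prefix-maximum list, state m
def prefixMax (m : Int) : List Int → List Int
  | [] => []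
  | x :: xs => let m' := if m > x then m else x
               m' :: prefixMax m' xs

def solve_alt (array : List Int) : Int :=
  match array with
  | [] => 0          -- B raises IndexError here; excluded by Pre_solve
  | a :: _ => ((PySem.Set.ofList (prefixMax a array)).length : Int)

-- ===== PRECONDITION & SPEC =====
-- Pre_ excludes only the empty list, on which both A and B raise IndexError (array[0]).
def Pre_solve (array : List Int) : Prop := array ≠ []
instance (array : List Int) : Decidable (Pre_solve array) := by unfold Pre_solve; infer_instance
def pvWitness_solve : List Int := ([3, 1, 4, 4, 5])

def Spec_solve (array : List Int) (out : Int) : Prop := out = solve_alt array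
instance (array : List Int) (out : Int) : Decidable (Spec_solve array out) := by unfold Spec_solve; infer_instance

-- ===== CLAIM (what is proved, stated in full; the proofs are below) =====
def Claim_equal_solve : Prop := ∀ (array : List Int), Dom_solve array → Pre_solve array → Spec_solve array (solve array)

-- ===== LEMMAS AND PROOFS =====

-- every element of prefixMax m xs is ≥ m
lemma prefixMax_ge (m : Int) (xs : List Int) : ∀ y ∈ prefixMax m xs, m ≤ y := by
  induction xs generalizing m with
  | nil => simp [prefixMax]
  | cons x xs ih =>
    intro y hy
    simp only [prefixMax, List.mem_cons] at hy
    rcases hy with rfl | hy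
    · split <;> omega
    · have := ih (if m > x then m else x) y hy
      split at this <;> omega

-- A's loop counts, shifted by r - 1, the distinct values of now :: prefixMax now xs
lemma loopA_card (xs : List Int) : ∀ (now r : Int),
    solveLoopA now r xs = r + ((now :: prefixMax now xs).toFinset.card : Int) - 1 := by
  induction xs with
  | nil => intro now r; simp [solveLoopA, prefixMax]
  | cons x xs ih =>
    intro now r
    by_cases h : now < x
    · have hm : (if now > x then now else x) = x := by split <;> omega
      have hnot : now ∉ (x :: prefixMax x xs).toFinset := by
        simp only [List.mem_toFinset, List.mem_cons]
        rintro (rfl | hmem)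
        · omega
        · exact absurd (prefixMax_ge x xs now hmem) (by omega)
      simp only [solveLoopA, if_pos h, prefixMax, hm]
      rw [ih x (r + 1)]
      rw [List.toFinset_cons (a := now), Finset.card_insert_of_notMem hnot]
      push_cast; ring
    · have hm : (if now > x then now else x) = now := by split <;> omega
      simp only [solveLoopA, if_neg h, prefixMax, hm]
      rw [ih now r]
      congr 2
      simp [List.toFinset_cons]

-- the length of PySem.Set.ofList l is the number of distinct elements of l
lemma ofList_length_eq_card (l : List Int) :
    (PySem.Set.ofList l).length = l.toFinset.card := by
  have hnd : (PySem.Set.ofList l).Nodup := PySem.Set.nodup_ofList l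
  have hfs : (PySem.Set.ofList l).toFinset = l.toFinset := by
    ext y; simp [List.mem_toFinset, PySem.Set.mem_ofList]
  rw [← List.toFinset_card_of_nodup hnd, hfs]

-- ===== VERDICT (by name: the statement is the Claim_ definition above) =====
theorem solve_spec : Claim_equal_solve := by
  intro array _ hpre
  unfold Spec_solve
  match array with
  | [] => exact absurd rfl hpre
  | a :: rest =>
    have ha : (if a > a then a else a) = a := by split <;> rfl
    simp only [solve, solve_alt, prefixMax, ha, ofList_length_eq_card]
    rw [loopA_card rest a 1]
    ring
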